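-- pv_equiv track=rewrite | github.com/Luolingwei/LeetCode | Interview/Google/QGoogle_Maximum Continous Island.py | find
-- ===== SOURCE A (Python) =====
-- def find(matrix):
--     m, n = len(matrix), len(matrix[0])
--
--     def mark_border(i,j):
--         if 0<=i<m and 0<=j<n and matrix[i][j] == 0:
--             matrix[i][j] = -1
--             mark_border(i+1,j)
--             mark_border(i-1,j)
--             mark_border(i,j+1)
--             mark_border(i,j-1)
--
--     def dfs(i,j):
--         area = 0
--         if 0<=i<m and 0<=j<n and matrix[i][j] != -1:
--             area += 1
--             matrix[i][j] = -1
--             area += dfs(i+1,j)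
--             area += dfs(i-1,j)
--             area += dfs(i,j+1)
--             area += dfs(i,j-1)
--         return area
--
--     for i in range(m):
--         if matrix[i][0] == 0: mark_border(i,0)
--         if matrix[i][n-1] == 0: mark_border(i, n-1)
--     for j in range(n):
--         if matrix[0][j] == 0: mark_border(0,j)
--         if matrix[m-1][j] == 0: mark_border(m-1,j)
--     res = 0
--     for i in range(m):
--         for j in range(n):
--             if matrix[i][j]!=-1:
--                 res = max(res, dfs(i,j))
--     return res
-- ===== SOURCE B (Python) =====
-- def find(matrix):
--     m, n = len(matrix), len(matrix[0])
--
--     def flood(si, sj, border):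
--         # iterative flood with an explicit stack; marks cells -1, returns component size
--         count = 0
--         stack = [(si, sj)]
--         while stack:
--             i, j = stack.pop()
--             if 0 <= i < m and 0 <= j < n and (matrix[i][j] == 0 if border else matrix[i][j] != -1):
--                 matrix[i][j] = -1
--                 count += 1
--                 stack.extend(((i, j - 1), (i, j + 1), (i - 1, j), (i + 1, j)))
--         return count
--
--     for i in range(m):
--         flood(i, 0, True)
--         flood(i, n - 1, True)
--     for j in range(n):
--         flood(0, j, True)
--         flood(m - 1, j, True)
--     res = 0
--     for i in range(m):
--         for j in range(n):
--             if matrix[i][j] != -1: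
--                 res = max(res, flood(i, j, False))
--     return res
-- ===== Notes on version B (the rewrite author's own statement) =====
-- stated objective: alternative
-- what changed: Both recursive flood fills (mark_border and dfs) are replaced by a single iterative explicit-stack flood routine; the two-pass structure stays, but there is no recursion, so no Python recursion-depth limit on large islands.
import Mathlib
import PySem

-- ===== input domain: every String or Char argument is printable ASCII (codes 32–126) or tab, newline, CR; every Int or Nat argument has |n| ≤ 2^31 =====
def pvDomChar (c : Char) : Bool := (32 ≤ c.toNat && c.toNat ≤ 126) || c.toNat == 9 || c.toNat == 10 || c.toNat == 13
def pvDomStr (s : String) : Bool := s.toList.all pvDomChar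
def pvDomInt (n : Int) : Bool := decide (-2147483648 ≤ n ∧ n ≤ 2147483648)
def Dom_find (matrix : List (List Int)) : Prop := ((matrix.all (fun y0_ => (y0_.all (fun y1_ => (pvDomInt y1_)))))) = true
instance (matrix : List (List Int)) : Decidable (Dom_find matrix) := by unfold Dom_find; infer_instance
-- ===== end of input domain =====

-- B replaces A's two recursive flood fills by iterative explicit-stack floods (same two-pass
-- structure); both Pythons mutate the matrix in place identically — equality proved on returns.

-- shared grid helpers: matrix[i][j] read and write (Python list-of-lists semantics, in-bounds)
def gat : List (List Int) → Nat → Nat → Option Int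
  | [], _, _ => none
  | r :: _, 0, j => r[j]?
  | _ :: rs, i+1, j => gat rs i j

def gset : List (List Int) → Nat → Nat → Int → List (List Int)
  | [], _, _, _ => []
  | r :: rs, 0, j, v => r.set j v :: rs
  | r :: rs, i+1, j, v => r :: gset rs i j v

-- number of grid cells satisfying p (termination measures / fuel)
def cnt (p : Int → Bool) (g : List (List Int)) : Nat := (g.map (fun r => r.countP p)).sum
def zeros (g : List (List Int)) : Nat := cnt (fun v => v == 0) g
def lives (g : List (List Int)) : Nat := cnt (fun v => v != -1) g

-- the flood guard: 0<=i<m and 0<=j<n and (matrix[i][j]==0 | matrix[i][j]!=-1)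
def fcond : Bool → Option Int → Bool
  | true, o => o == some 0
  | false, o => o.getD (-1) != -1

def fguard (m n : Int) (border : Bool) (g : List (List Int)) (i j : Int) : Bool :=
  decide (0 ≤ i) && decide (i < m) && decide (0 ≤ j) && decide (j < n) &&
    fcond border (gat g i.toNat j.toNat)

-- a true guard points at a real cell that is then set to -1: the live count strictly drops
-- (needed by floodLoop's termination proof, hence stated before the ports)
theorem countP_set_lt (p : Int → Bool) (hp : p (-1) = false) :
    ∀ (r : List Int) (j : Nat) (v : Int), r[j]? = some v → p v = true →
      (r.set j (-1)).countP p < r.countP p := by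
  intro r
  induction r with
  | nil => intro j v h; simp at h
  | cons x xs ih =>
    intro j v h hv
    cases j with
    | zero =>
      simp at h; subst h
      simp [hp, hv]
    | succ j =>
      simp at h
      simp [List.countP_cons]
      have := ih j v h hv; omega

theorem cnt_gset_lt (p : Int → Bool) (hp : p (-1) = false) :
    ∀ (g : List (List Int)) (i j : Nat) (v : Int), gat g i j = some v → p v = true →
      cnt p (gset g i j (-1)) < cnt p g := by
  intro g
  induction g with
  | nil => intro i j v h; simp [gat] at h
  | cons r rs ih =>
    intro i j v h hv
    cases i with
    | zero =>
      simp [gat] at h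
      simp [gset, cnt]
      have := countP_set_lt p hp r j v h hv; omega
    | succ i =>
      simp [gat] at h
      simp [gset, cnt]
      have := ih i j v h hv; simp [cnt] at this; omega

theorem fguard_lives (m n : Int) (border : Bool) (g : List (List Int)) (i j : Int)
    (h : fguard m n border g i j = true) :
    lives (gset g i.toNat j.toNat (-1)) < lives g := by
  have hc : fcond border (gat g i.toNat j.toNat) = true := by
    simp only [fguard, Bool.and_eq_true] at h; exact h.2
  cases border with
  | true =>
    simp only [fcond, beq_iff_eq] at hc
    exact cnt_gset_lt _ (by decide) g i.toNat j.toNat 0 hc (by decide)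
  | false =>
    cases ho : gat g i.toNat j.toNat with
    | none => rw [ho] at hc; simp [fcond] at hc
    | some v =>
      rw [ho] at hc; simp only [fcond, Option.getD_some, bne_iff_ne, ne_eq] at hc
      exact cnt_gset_lt _ (by decide) g i.toNat j.toNat v ho (by simpa using hc)

-- ===== PORT A =====
-- mark_border, recursion made total by fuel (find passes fuel = zeros g, always sufficient)
def markB (m n : Int) (f : Nat) (g : List (List Int)) (i j : Int) : List (List Int) :=
  if fguard m n true g i j then
    match f with
    | 0 => g
    | Nat.succ f' =>
      let g1 := gset g i.toNat j.toNat (-1)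
      markB m n f' (markB m n f' (markB m n f' (markB m n f' g1 (i+1) j) (i-1) j) i (j+1)) i (j-1)
  else g

-- dfs, recursion made total by fuel (find passes fuel = lives g, always sufficient)
def dfsF (m n : Int) (f : Nat) (g : List (List Int)) (i j : Int) : List (List Int) × Int :=
  if fguard m n false g i j then
    match f with
    | 0 => (g, 0)
    | Nat.succ f' =>
      let g1 := gset g i.toNat j.toNat (-1)
      let r1 := dfsF m n f' g1 (i+1) j
      let r2 := dfsF m n f' r1.1 (i-1) j
      let r3 := dfsF m n f' r2.1 i (j+1)
      let r4 := dfsF m n f' r3.1 i (j-1)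
      (r4.1, 1 + r1.2 + r2.2 + r3.2 + r4.2)
  else (g, 0)

def find (matrix : List (List Int)) : Int :=
  let m : Int := matrix.length
  let n : Int := (matrix.headD []).length
  let g1 := (PySem.List.pyRange 0 m 1).foldl (fun g i =>
    let g := if gat g i.toNat ((0:Int)).toNat = some 0 then markB m n (zeros g) g i 0 else g
    if gat g i.toNat (n-1).toNat = some 0 then markB m n (zeros g) g i (n-1) else g) matrix
  let g2 := (PySem.List.pyRange 0 n 1).foldl (fun g j =>
    let g := if gat g ((0:Int)).toNat j.toNat = some 0 then markB m n (zeros g) g 0 j else g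
    if gat g (m-1).toNat j.toNat = some 0 then markB m n (zeros g) g (m-1) j else g) g1
  let st := (PySem.List.pyRange 0 m 1).foldl (fun (st : List (List Int) × Int) i =>
    (PySem.List.pyRange 0 n 1).foldl (fun (st : List (List Int) × Int) j =>
      if (gat st.1 i.toNat j.toNat).getD (-1) ≠ -1 then
        let r := dfsF m n (lives st.1) st.1 i j
        (r.1, max st.2 r.2)
      else st) st) (g2, (0:Int))
  st.2

-- ===== PORT B =====
-- iterative flood with an explicit stack (Lean list head = top of Python's stack);
-- marks cells -1, returns (grid, component size)
def floodLoop (m n : Int) (border : Bool) (g : List (List Int)) (stack : List (Int × Int)) (c : Int) :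
    List (List Int) × Int :=
  match stack with
  | [] => (g, c)
  | (i, j) :: ps =>
    if h : fguard m n border g i j = true then
      floodLoop m n border (gset g i.toNat j.toNat (-1))
        ((i+1, j) :: (i-1, j) :: (i, j+1) :: (i, j-1) :: ps) (c+1)
    else floodLoop m n border g ps c
  termination_by (lives g, stack.length)
  decreasing_by
  · exact Prod.Lex.left _ _ (fguard_lives m n border g i j h)
  · exact Prod.Lex.right _ (by simp only [List.length_cons]; omega)

def find_alt (matrix : List (List Int)) : Int :=
  let m : Int := matrix.length
  let n : Int := (matrix.headD []).length
  let g1 := (PySem.List.pyRange 0 m 1).foldl (fun g i =>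
    (floodLoop m n true (floodLoop m n true g [(i, 0)] 0).1 [(i, n-1)] 0).1) matrix
  let g2 := (PySem.List.pyRange 0 n 1).foldl (fun g j =>
    (floodLoop m n true (floodLoop m n true g [(0, j)] 0).1 [(m-1, j)] 0).1) g1
  let st := (PySem.List.pyRange 0 m 1).foldl (fun (st : List (List Int) × Int) i =>
    (PySem.List.pyRange 0 n 1).foldl (fun (st : List (List Int) × Int) j =>
      if (gat st.1 i.toNat j.toNat).getD (-1) ≠ -1 then
        let r := floodLoop m n false st.1 [(i, j)] 0
        (r.1, max st.2 r.2)
      else st) st) (g2, (0:Int))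
  st.2

-- ===== PRECONDITION & SPEC =====
-- Pre_ excludes exactly the inputs where Python A raises IndexError: the empty matrix,
-- an empty first row, or a row shorter than the first row (matrix[i][j], j < n, fails).
def Pre_find (matrix : List (List Int)) : Prop :=
  matrix ≠ [] ∧ 0 < (matrix.headD []).length ∧
    ∀ r ∈ matrix, (matrix.headD []).length ≤ r.length
instance (matrix : List (List Int)) : Decidable (Pre_find matrix) := by
  unfold Pre_find; infer_instance

def pvWitness_find : List (List Int) := [[1, 0, 1], [1, 0, 1], [1, 1, 1]]

def Spec_find (matrix : List (List Int)) (out : Int) : Prop := out = find_alt matrix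
instance (matrix : List (List Int)) (out : Int) : Decidable (Spec_find matrix out) := by
  unfold Spec_find; infer_instance

-- ===== CLAIM (what is proved, stated in full; the proofs are below) =====
def Claim_equal_find : Prop :=
  ∀ (matrix : List (List Int)), Dom_find matrix → Pre_find matrix → Spec_find matrix (find matrix)

-- ===== LEMMAS AND PROOFS =====

theorem countP_set_le (p : Int → Bool) (hp : p (-1) = false) :
    ∀ (r : List Int) (j : Nat), (r.set j (-1)).countP p ≤ r.countP p := by
  intro r
  induction r with
  | nil => intro j; simp
  | cons x xs ih =>
    intro j
    cases j with
    | zero => simp [List.countP_cons, hp]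
    | succ j => simp [List.countP_cons]; have := ih j; omega

theorem cnt_gset_le (p : Int → Bool) (hp : p (-1) = false) :
    ∀ (g : List (List Int)) (i j : Nat), cnt p (gset g i j (-1)) ≤ cnt p g := by
  intro g
  induction g with
  | nil => intro i j; simp [gset]
  | cons r rs ih =>
    intro i j
    cases i with
    | zero => simp [gset, cnt]; have := countP_set_le p hp r j; omega
    | succ i => simp [gset, cnt]; have := ih i j; simp [cnt] at this; omega

theorem fguard_zeros (m n : Int) (g : List (List Int)) (i j : Int)
    (h : fguard m n true g i j = true) :
    zeros (gset g i.toNat j.toNat (-1)) < zeros g := by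
  have hc : fcond true (gat g i.toNat j.toNat) = true := by
    simp only [fguard, Bool.and_eq_true] at h; exact h.2
  simp only [fcond, beq_iff_eq] at hc
  exact cnt_gset_lt _ (by decide) g i.toNat j.toNat 0 hc (by decide)

-- unfolding equations for the fueled recursions
theorem markB_succ (m n : Int) (f : Nat) (g : List (List Int)) (i j : Int)
    (h : fguard m n true g i j = true) :
    markB m n (f+1) g i j
      = markB m n f (markB m n f (markB m n f (markB m n f
          (gset g i.toNat j.toNat (-1)) (i+1) j) (i-1) j) i (j+1)) i (j-1) := by
  rw [markB.eq_def]; simp only [if_pos h]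

theorem markB_stop (m n : Int) (f : Nat) (g : List (List Int)) (i j : Int)
    (h : ¬ fguard m n true g i j = true) : markB m n f g i j = g := by
  rw [markB.eq_def]; simp only [if_neg h]

theorem dfsF_succ (m n : Int) (f : Nat) (g : List (List Int)) (i j : Int)
    (h : fguard m n false g i j = true) :
    dfsF m n (f+1) g i j
      = ((dfsF m n f (dfsF m n f (dfsF m n f (dfsF m n f
            (gset g i.toNat j.toNat (-1)) (i+1) j).1 (i-1) j).1 i (j+1)).1 i (j-1)).1,
         1 + (dfsF m n f (gset g i.toNat j.toNat (-1)) (i+1) j).2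
           + (dfsF m n f (dfsF m n f (gset g i.toNat j.toNat (-1)) (i+1) j).1 (i-1) j).2
           + (dfsF m n f (dfsF m n f (dfsF m n f (gset g i.toNat j.toNat (-1)) (i+1) j).1 (i-1) j).1 i (j+1)).2
           + (dfsF m n f (dfsF m n f (dfsF m n f (dfsF m n f
                (gset g i.toNat j.toNat (-1)) (i+1) j).1 (i-1) j).1 i (j+1)).1 i (j-1)).2) := by
  rw [dfsF.eq_def]; simp only [if_pos h]

theorem dfsF_stop (m n : Int) (f : Nat) (g : List (List Int)) (i j : Int)
    (h : ¬ fguard m n false g i j = true) : dfsF m n f g i j = (g, 0) := by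
  rw [dfsF.eq_def]; simp only [if_neg h]

theorem markB_zeros_le (m n : Int) :
    ∀ (f : Nat) (g : List (List Int)) (i j : Int), zeros (markB m n f g i j) ≤ zeros g := by
  intro f
  induction f with
  | zero => intro g i j; rw [markB.eq_def]; split <;> simp
  | succ f ih =>
    intro g i j
    by_cases h : fguard m n true g i j = true
    · rw [markB_succ m n f g i j h]
      have h1 := cnt_gset_le (fun v => v == 0) (by decide) g i.toNat j.toNat
      have h2 := ih (gset g i.toNat j.toNat (-1)) (i+1) j
      have h3 := ih (markB m n f (gset g i.toNat j.toNat (-1)) (i+1) j) (i-1) j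
      have h4 := ih (markB m n f (markB m n f (gset g i.toNat j.toNat (-1)) (i+1) j) (i-1) j) i (j+1)
      have h5 := ih (markB m n f (markB m n f (markB m n f (gset g i.toNat j.toNat (-1)) (i+1) j) (i-1) j) i (j+1)) i (j-1)
      simp only [zeros] at *
      omega
    · rw [markB_stop m n _ g i j h]

theorem dfsF_lives_le (m n : Int) :
    ∀ (f : Nat) (g : List (List Int)) (i j : Int), lives (dfsF m n f g i j).1 ≤ lives g := by
  intro f
  induction f with
  | zero => intro g i j; rw [dfsF.eq_def]; split <;> simp
  | succ f ih =>
    intro g i j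
    by_cases h : fguard m n false g i j = true
    · rw [dfsF_succ m n f g i j h]
      have h1 := cnt_gset_le (fun v => v != -1) (by decide) g i.toNat j.toNat
      have h2 := ih (gset g i.toNat j.toNat (-1)) (i+1) j
      have h3 := ih (dfsF m n f (gset g i.toNat j.toNat (-1)) (i+1) j).1 (i-1) j
      have h4 := ih (dfsF m n f (dfsF m n f (gset g i.toNat j.toNat (-1)) (i+1) j).1 (i-1) j).1 i (j+1)
      have h5 := ih (dfsF m n f (dfsF m n f (dfsF m n f (gset g i.toNat j.toNat (-1)) (i+1) j).1 (i-1) j).1 i (j+1)).1 i (j-1)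
      simp only [lives] at *
      omega
    · rw [dfsF_stop m n _ g i j h]

-- the bridge: one stack-flood step from (i,j) = one full recursive mark_border from (i,j)
theorem bridge_border (N : Nat) : ∀ (m n : Int) (g : List (List Int)), zeros g ≤ N →
    ∀ (f : Nat), zeros g ≤ f → ∀ (i j : Int) (ps : List (Int × Int)) (c : Int),
    ∃ c', floodLoop m n true g ((i, j) :: ps) c = floodLoop m n true (markB m n f g i j) ps c' := by
  induction N with
  | zero =>
    intro m n g hz f hf i j ps c
    by_cases h : fguard m n true g i j = true
    · exact absurd (fguard_zeros m n g i j h) (by omega)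
    · rw [floodLoop, markB_stop m n f g i j h]
      simp only [dif_neg h]
      exact ⟨c, rfl⟩
  | succ N ih =>
    intro m n g hz f hf i j ps c
    by_cases h : fguard m n true g i j = true
    · have hlt := fguard_zeros m n g i j h
      cases f with
      | zero => omega
      | succ f =>
        have e0 : floodLoop m n true g ((i,j)::ps) c
            = floodLoop m n true (gset g i.toNat j.toNat (-1))
                ((i+1,j)::(i-1,j)::(i,j+1)::(i,j-1)::ps) (c+1) := by
          rw [floodLoop]; simp only [dif_pos h]
        have m1 := markB_zeros_le m n f (gset g i.toNat j.toNat (-1)) (i+1) j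
        have m2 := markB_zeros_le m n f (markB m n f (gset g i.toNat j.toNat (-1)) (i+1) j) (i-1) j
        have m3 := markB_zeros_le m n f (markB m n f (markB m n f (gset g i.toNat j.toNat (-1)) (i+1) j) (i-1) j) i (j+1)
        obtain ⟨c1, e1⟩ := ih m n (gset g i.toNat j.toNat (-1)) (by omega) f (by omega) (i+1) j _ (c+1)
        obtain ⟨c2, e2⟩ := ih m n (markB m n f (gset g i.toNat j.toNat (-1)) (i+1) j) (by omega) f (by omega) (i-1) j _ c1
        obtain ⟨c3, e3⟩ := ih m n (markB m n f (markB m n f (gset g i.toNat j.toNat (-1)) (i+1) j) (i-1) j) (by omega) f (by omega) i (j+1) _ c2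
        obtain ⟨c4, e4⟩ := ih m n (markB m n f (markB m n f (markB m n f (gset g i.toNat j.toNat (-1)) (i+1) j) (i-1) j) i (j+1)) (by omega) f (by omega) i (j-1) ps c3
        refine ⟨c4, ?_⟩
        rw [e0, e1, e2, e3, e4, markB_succ m n f g i j h]
    · rw [floodLoop, markB_stop m n f g i j h]
      simp only [dif_neg h]
      exact ⟨c, rfl⟩

-- the bridge: one stack-flood step from (i,j) = one full recursive dfs from (i,j), same count
theorem bridge_live (N : Nat) : ∀ (m n : Int) (g : List (List Int)), lives g ≤ N →
    ∀ (f : Nat), lives g ≤ f → ∀ (i j : Int) (ps : List (Int × Int)) (c : Int),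
    floodLoop m n false g ((i, j) :: ps) c
      = floodLoop m n false (dfsF m n f g i j).1 ps (c + (dfsF m n f g i j).2) := by
  induction N with
  | zero =>
    intro m n g hz f hf i j ps c
    by_cases h : fguard m n false g i j = true
    · exact absurd (fguard_lives m n false g i j h) (by omega)
    · rw [floodLoop, dfsF_stop m n f g i j h]
      simp only [dif_neg h]
      simp
  | succ N ih =>
    intro m n g hz f hf i j ps c
    by_cases h : fguard m n false g i j = true
    · have hlt := fguard_lives m n false g i j h
      cases f with
      | zero => omega
      | succ f =>
        have e0 : floodLoop m n false g ((i,j)::ps) c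
            = floodLoop m n false (gset g i.toNat j.toNat (-1))
                ((i+1,j)::(i-1,j)::(i,j+1)::(i,j-1)::ps) (c+1) := by
          rw [floodLoop]; simp only [dif_pos h]
        have m1 := dfsF_lives_le m n f (gset g i.toNat j.toNat (-1)) (i+1) j
        have m2 := dfsF_lives_le m n f (dfsF m n f (gset g i.toNat j.toNat (-1)) (i+1) j).1 (i-1) j
        have m3 := dfsF_lives_le m n f (dfsF m n f (dfsF m n f (gset g i.toNat j.toNat (-1)) (i+1) j).1 (i-1) j).1 i (j+1)
        have e1 := ih m n (gset g i.toNat j.toNat (-1)) (by omega) f (by omega) (i+1) j ((i-1,j)::(i,j+1)::(i,j-1)::ps) (c+1)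
        have e2 := ih m n (dfsF m n f (gset g i.toNat j.toNat (-1)) (i+1) j).1 (by omega) f (by omega) (i-1) j ((i,j+1)::(i,j-1)::ps) (c+1+(dfsF m n f (gset g i.toNat j.toNat (-1)) (i+1) j).2)
        have e3 := ih m n (dfsF m n f (dfsF m n f (gset g i.toNat j.toNat (-1)) (i+1) j).1 (i-1) j).1 (by omega) f (by omega) i (j+1) ((i,j-1)::ps) (c+1+(dfsF m n f (gset g i.toNat j.toNat (-1)) (i+1) j).2+(dfsF m n f (dfsF m n f (gset g i.toNat j.toNat (-1)) (i+1) j).1 (i-1) j).2)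
        have e4 := ih m n (dfsF m n f (dfsF m n f (dfsF m n f (gset g i.toNat j.toNat (-1)) (i+1) j).1 (i-1) j).1 i (j+1)).1 (by omega) f (by omega) i (j-1) ps (c+1+(dfsF m n f (gset g i.toNat j.toNat (-1)) (i+1) j).2+(dfsF m n f (dfsF m n f (gset g i.toNat j.toNat (-1)) (i+1) j).1 (i-1) j).2+(dfsF m n f (dfsF m n f (dfsF m n f (gset g i.toNat j.toNat (-1)) (i+1) j).1 (i-1) j).1 i (j+1)).2)
        rw [e0, e1, e2, e3, e4, dfsF_succ m n f g i j h]
        congr 1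
        omega
    · rw [floodLoop, dfsF_stop m n f g i j h]
      simp only [dif_neg h]
      simp

theorem flood_border_eq (m n : Int) (g : List (List Int)) (i j : Int) :
    (floodLoop m n true g [(i, j)] 0).1 = markB m n (zeros g) g i j := by
  obtain ⟨c', e⟩ := bridge_border (zeros g) m n g le_rfl (zeros g) le_rfl i j [] 0
  rw [e, floodLoop]

theorem flood_live_eq (m n : Int) (g : List (List Int)) (i j : Int) :
    floodLoop m n false g [(i, j)] 0 = dfsF m n (lives g) g i j := by
  have e := bridge_live (lives g) m n g le_rfl (lives g) le_rfl i j [] 0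
  rw [e, floodLoop]
  simp

theorem ifmark (m n : Int) (g : List (List Int)) (i j : Int) :
    (if gat g i.toNat j.toNat = some 0 then markB m n (zeros g) g i j else g)
      = markB m n (zeros g) g i j := by
  by_cases h : gat g i.toNat j.toNat = some 0
  · rw [if_pos h]
  · rw [if_neg h, markB_stop]
    simp [fguard, fcond, h]

theorem find_eq_alt (matrix : List (List Int)) : find matrix = find_alt matrix := by
  simp only [find, find_alt, flood_border_eq, flood_live_eq, ifmark]

-- ===== VERDICT (by name: the statement is the Claim_ definition above) =====
theorem find_spec : Claim_equal_find := by
  intro matrix _ _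
  unfold Spec_find
  exact find_eq_alt matrix
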